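-- pv_equiv track=rewrite | github.com/Swarnil/Python-language | Challenge.py | largest_difference
-- ===== SOURCE A (Python) =====
-- def largest_difference(l):
--     large=l[0]
--     for i in range(1,len(l)):
--         if l[i]>large:
--             large=l[i]
--     small=l[0]
--     for i in range(1,len(l)):
--         if l[i]<small:
--             small=l[i]
--     return large-small
-- ===== SOURCE B (Python) =====
-- def largest_difference(l):
--     s = sorted(l)
--     return s[-1] - s[0]
-- ===== Notes on version B (the rewrite author's own statement) =====
-- stated objective: alternative
-- what changed: Replaces A's two explicit scans (one for the max, one for the min) by sorting the list once and subtracting the first element of the sorted list from the last.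
import Mathlib
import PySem

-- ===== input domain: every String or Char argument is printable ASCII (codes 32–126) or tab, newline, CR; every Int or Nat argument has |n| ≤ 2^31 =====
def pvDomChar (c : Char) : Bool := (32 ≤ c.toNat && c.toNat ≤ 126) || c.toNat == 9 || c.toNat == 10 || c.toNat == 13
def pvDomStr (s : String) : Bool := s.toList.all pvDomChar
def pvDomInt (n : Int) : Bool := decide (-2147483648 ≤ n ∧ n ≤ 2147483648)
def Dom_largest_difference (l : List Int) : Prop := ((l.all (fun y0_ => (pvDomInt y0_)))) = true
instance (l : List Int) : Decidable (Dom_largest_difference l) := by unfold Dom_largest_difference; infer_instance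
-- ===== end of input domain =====

-- B sorts once and subtracts the sorted list's first element from its last, instead of A's two scans (alternative decomposition, not faster).

-- ===== PORT A =====
-- A: first loop finds the maximum, second loop finds the minimum, return max - min.
-- l[0] raises IndexError on the empty list: excluded by Pre_largest_difference.
def largest_difference (l : List Int) : Int :=
  match l with
  | [] => 0  -- unreachable under Pre_largest_difference (Python raises IndexError)
  | x :: xs =>
    let large := xs.foldl (fun large v => if v > large then v else large) x
    let small := xs.foldl (fun small v => if v < small then v else small) x
    large - small

-- ===== PORT B =====
-- B: s = sorted(l); return s[-1] - s[0].  s[-1] raises IndexError on the empty list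
-- (excluded by Pre_), so the .getD 0 defaults are unreachable under Pre_.
def largest_difference_alt (l : List Int) : Int :=
  let s := PySem.List.sorted l (fun x => x) false
  (PySem.List.pyGet? s (-1)).getD 0 - (PySem.List.pyGet? s 0).getD 0

-- ===== PRECONDITION & SPEC =====
-- Pre_ excludes only the empty list, on which Python A raises IndexError.
def Pre_largest_difference (l : List Int) : Prop := l ≠ []
instance (l : List Int) : Decidable (Pre_largest_difference l) := by
  unfold Pre_largest_difference; infer_instance
def pvWitness_largest_difference : List Int := [3, -1, 7]
def Spec_largest_difference (l : List Int) (out : Int) : Prop := out = largest_difference_alt l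
instance (l : List Int) (out : Int) : Decidable (Spec_largest_difference l out) := by
  unfold Spec_largest_difference; infer_instance

-- ===== CLAIM (what is proved, stated in full; the proofs are below) =====
def Claim_equal_largest_difference : Prop := ∀ (l : List Int), Dom_largest_difference l → Pre_largest_difference l → Spec_largest_difference l (largest_difference l)

-- ===== LEMMAS AND PROOFS =====

-- A's max-fold is a member of x :: xs and an upper bound of it.
theorem foldA_max_mem (xs : List Int) (x : Int) :
    xs.foldl (fun large v => if v > large then v else large) x ∈ x :: xs := by
  induction xs generalizing x with
  | nil => simp [List.foldl]
  | cons y ys ih =>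
    simp only [List.foldl]
    rcases List.mem_cons.mp (ih (if y > x then y else x)) with h | h
    · rw [h]; split_ifs <;> simp
    · simp [h]

theorem foldA_max_ub (xs : List Int) (x : Int) :
    ∀ y ∈ x :: xs, y ≤ xs.foldl (fun large v => if v > large then v else large) x := by
  induction xs generalizing x with
  | nil => intro y hy; simp at hy; simp [hy, List.foldl]
  | cons z zs ih =>
    intro y hy
    simp only [List.foldl]
    have hbase := ih (if z > x then z else x) (if z > x then z else x) (by simp)
    rcases List.mem_cons.mp hy with h | h
    · subst h; exact le_trans (by split_ifs <;> omega) hbase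
    · rcases List.mem_cons.mp h with h' | h'
      · subst h'; exact le_trans (by split_ifs <;> omega) hbase
      · exact ih (if z > x then z else x) y (by simp [h'])

-- A's min-fold is a member of x :: xs and a lower bound of it.
theorem foldA_min_mem (xs : List Int) (x : Int) :
    xs.foldl (fun small v => if v < small then v else small) x ∈ x :: xs := by
  induction xs generalizing x with
  | nil => simp [List.foldl]
  | cons y ys ih =>
    simp only [List.foldl]
    rcases List.mem_cons.mp (ih (if y < x then y else x)) with h | h
    · rw [h]; split_ifs <;> simp
    · simp [h]

theorem foldA_min_lb (xs : List Int) (x : Int) :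
    ∀ y ∈ x :: xs, xs.foldl (fun small v => if v < small then v else small) x ≤ y := by
  induction xs generalizing x with
  | nil => intro y hy; simp at hy; simp [hy, List.foldl]
  | cons z zs ih =>
    intro y hy
    simp only [List.foldl]
    have hbase := ih (if z < x then z else x) (if z < x then z else x) (by simp)
    rcases List.mem_cons.mp hy with h | h
    · subst h; exact le_trans hbase (by split_ifs <;> omega)
    · rcases List.mem_cons.mp h with h' | h'
      · subst h'; exact le_trans hbase (by split_ifs <;> omega)
      · exact ih (if z < x then z else x) y (by simp [h'])

-- In a ≤-pairwise nonempty list, every member is ≤ the last element (getLastD form).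
theorem pairwise_le_getLastD (t : List Int) :
    ∀ (a d : Int), (a :: t).Pairwise (· ≤ ·) → ∀ y ∈ a :: t, y ≤ (a :: t).getLastD d := by
  induction t with
  | nil => intro a d _ y hy; simp at hy; simp [hy]
  | cons b u ih =>
    intro a d hp y hy
    have hp' := List.pairwise_cons.mp hp
    rw [List.getLastD_cons]
    rcases List.mem_cons.mp hy with h' | h'
    · rw [h']
      exact le_trans (hp'.1 b (by simp)) (ih b a hp'.2 b (by simp))
    · exact ih b a hp'.2 y h'

theorem getLastD_mem (a : Int) (t : List Int) : (a :: t).getLastD 0 ∈ a :: t := by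
  rw [List.getLastD_cons]
  exact List.getLastD_mem_cons

theorem pairwise_head_le (a : Int) (t : List Int) (hp : (a :: t).Pairwise (· ≤ ·)) :
    ∀ y ∈ a :: t, a ≤ y := by
  intro y hy
  rcases List.mem_cons.mp hy with h | h
  · simp [h]
  · exact (List.pairwise_cons.mp hp).1 y h

theorem pyGet_neg_one (s : List Int) (h : s ≠ []) :
    (PySem.List.pyGet? s (-1)).getD 0 = s.getLastD 0 := by
  have hl : 1 ≤ s.length := List.length_pos_iff.mpr h
  simp only [PySem.List.pyGet?, PySem.List.pyIdx?]
  rw [if_neg (by norm_num : ¬ (0:Int) ≤ -1), if_pos (by omega : -(s.length:Int) ≤ -1)]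
  simp [List.getElem?_eq_getElem (by omega : s.length - 1 < s.length),
    List.getLastD_eq_getLast?, List.getLast?_eq_some_getLast h, List.getLast_eq_getElem]

theorem pyGet_zero (a : Int) (t : List Int) :
    PySem.List.pyGet? (a :: t) 0 = some a := by
  simp [PySem.List.pyGet?, PySem.List.pyIdx?]

-- ===== VERDICT (by name: the statement is the Claim_ definition above) =====
theorem largest_difference_spec : Claim_equal_largest_difference := by
  intro l _ hpre
  unfold Spec_largest_difference
  cases l with
  | nil => exact absurd rfl hpre
  | cons x xs =>
    show (xs.foldl (fun large v => if v > large then v else large) x)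
        - (xs.foldl (fun small v => if v < small then v else small) x)
        = (PySem.List.pyGet? (PySem.List.sorted (x :: xs) (fun x => x) false) (-1)).getD 0
        - (PySem.List.pyGet? (PySem.List.sorted (x :: xs) (fun x => x) false) 0).getD 0
    have hperm : (PySem.List.sorted (x :: xs) (fun x => x) false).Perm (x :: xs) :=
      PySem.List.sorted_perm _ _ _
    have hpw : (PySem.List.sorted (x :: xs) (fun x => x) false).Pairwise (· ≤ ·) := by
      have := PySem.List.sorted_pairwise (xs := x :: xs) (key := fun x => x)
      simpa using this
    have hsne : PySem.List.sorted (x :: xs) (fun x => x) false ≠ [] := by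
      intro h0
      have := hperm.length_eq
      simp [h0] at this
    obtain ⟨a, t, hst⟩ := List.exists_cons_of_ne_nil hsne
    rw [pyGet_neg_one _ hsne, hst, pyGet_zero, Option.getD_some]
    have hmem : ∀ y : Int, y ∈ a :: t ↔ y ∈ x :: xs := fun y => hst ▸ hperm.mem_iff
    have hpw' : (a :: t).Pairwise (· ≤ ·) := hst ▸ hpw
    have hhead_min :
        xs.foldl (fun small v => if v < small then v else small) x = a := by
      apply le_antisymm
      · exact foldA_min_lb xs x a ((hmem a).mp (by simp))
      · exact pairwise_head_le a t hpw' _ ((hmem _).mpr (foldA_min_mem xs x))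
    have hlast_max :
        xs.foldl (fun large v => if v > large then v else large) x = (a :: t).getLastD 0 := by
      apply le_antisymm
      · exact pairwise_le_getLastD t a 0 hpw' _ ((hmem _).mpr (foldA_max_mem xs x))
      · exact foldA_max_ub xs x _ ((hmem _).mp (getLastD_mem a t))
    rw [hhead_min, hlast_max]
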